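-- pv_equiv track=rewrite | github.com/cirosantilli/cirosantilli.github.io | euler/960.py | F
-- ===== SOURCE A (Python) =====
-- from math import comb, factorial
--
-- MOD = 10**9 + 7
--
-- def F(n: int) -> int:
--     S = 0
--     inv2 = (MOD + 1) // 2
--     for k in range(1, n // 2 + 1):
--         trees_k = 1 if k == 1 else pow(k, k - 2, MOD)
--         trees_nk = pow(n - k, n - k - 2, MOD)
--         ways = comb(n, k)
--         ways %= MOD
--         ways = ways * trees_k % MOD
--         ways = ways * trees_nk % MOD
--         ways = ways * k % MOD
--         ways = ways * (n - k) % MOD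
--         if 2 * k == n:
--             ways = ways * inv2 % MOD
--         S = (S + k * ways) % MOD
--     return S * factorial(n - 1) % MOD
-- ===== SOURCE B (Python) =====
-- MOD = 10**9 + 7
--
--
-- def cayley(m):
--     # number of labeled trees on m vertices, mod MOD (Cayley's formula)
--     return pow(m, m - 2, MOD) if m > 1 else 1
--
--
-- def F(n: int) -> int:
--     # Row n of Pascal's triangle mod MOD, by the additive recurrence (no comb, no division).
--     row = [1]
--     for _ in range(n):
--         row = [1] + [(a + b) % MOD for a, b in zip(row, row[1:])] + [1]
--     # Sum over the FULL range k = 1..n-1 with weight min(k, n-k): by the symmetry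
--     # T(k) = T(n-k) of the split count T(k) = C(n,k)*cayley(k)*cayley(n-k)*k*(n-k),
--     # this equals twice A's half-range sum, so one final halving replaces the
--     # special-cased middle term.
--     total = 0
--     for k in range(1, n):
--         t = row[k] * cayley(k) % MOD * cayley(n - k) % MOD
--         t = t * k % MOD * (n - k) % MOD
--         total = (total + min(k, n - k) * t) % MOD
--     fact = 1
--     for i in range(2, n):
--         fact = fact * i % MOD
--     return total * ((MOD + 1) // 2) % MOD * fact % MOD
-- ===== Notes on version B (the rewrite author's own statement) =====
-- stated objective: alternative
-- what changed: B computes all binomials with a Pascal-triangle DP row mod p instead of math.comb, replaces A's half-range loop with its special-cased halved middle term by a full-range sum weighted by min(k, n-k) that is halved once at the end (using the k <-> n-k symmetry of the split count), and replaces the bigint factorial(n-1) by a running modular product.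
-- outside the precondition, e.g. on F(0): A raises ValueError, B returns 0
import Mathlib
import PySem

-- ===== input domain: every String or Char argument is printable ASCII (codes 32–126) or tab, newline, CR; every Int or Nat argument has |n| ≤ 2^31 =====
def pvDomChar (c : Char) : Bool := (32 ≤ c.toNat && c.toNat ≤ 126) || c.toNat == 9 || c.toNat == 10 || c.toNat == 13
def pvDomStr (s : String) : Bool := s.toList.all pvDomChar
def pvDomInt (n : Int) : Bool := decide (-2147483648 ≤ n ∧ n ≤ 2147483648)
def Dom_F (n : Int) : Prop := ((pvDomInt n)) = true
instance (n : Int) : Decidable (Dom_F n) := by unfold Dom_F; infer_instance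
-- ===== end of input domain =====

-- B replaces math.comb by a Pascal-triangle DP row mod p, replaces A's half-range loop with its
-- special-cased middle term by a full-range sum weighted by min(k, n-k) (halved once at the end,
-- by the symmetry of the split count), and the bigint factorial by a modular product.

-- ===== PORT A =====
def MODI : Int := 10 ^ 9 + 7

-- Python's three-argument pow(b, e, m): for e < 0 CPython inverts b mod m first (extended gcd,
-- normalised into [0, m)); A only reaches e < 0 with b = 1 (n = 2, k = 1).
def pyPowMod (b e m : Int) : Int :=
  if e < 0 then PySem.Int.powMod (PySem.Int.mod (Int.gcdA b m) m) (-e).toNat m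
  else PySem.Int.powMod b e.toNat m

-- math.comb on the nonnegative arguments A uses
def combI (n k : Int) : Int := (Nat.choose n.toNat k.toNat : Int)

-- A's loop body: the value multiplied by k and added into S at iteration k
def waysA (n k : Int) : Int :=
  let inv2 := PySem.Int.floordiv (MODI + 1) 2
  let trees_k := if k = 1 then 1 else pyPowMod k (k - 2) MODI
  let trees_nk := pyPowMod (n - k) (n - k - 2) MODI
  let ways := PySem.Int.mod (combI n k) MODI
  let ways := PySem.Int.mod (ways * trees_k) MODI
  let ways := PySem.Int.mod (ways * trees_nk) MODI
  let ways := PySem.Int.mod (ways * k) MODI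
  let ways := PySem.Int.mod (ways * (n - k)) MODI
  if 2 * k = n then PySem.Int.mod (ways * inv2) MODI else ways

def F (n : Int) : Int :=
  PySem.Int.mod
    (((PySem.List.pyRange 1 (PySem.Int.floordiv n 2 + 1) 1).foldl
        (fun S k => PySem.Int.mod (S + k * waysA n k) MODI) 0)
      * (Nat.factorial (n - 1).toNat : Int)) MODI

-- ===== PORT B =====
-- number of labeled trees on m vertices mod MOD (Cayley's formula)
def cayleyM (m : Int) : Int :=
  if 1 < m then PySem.Int.powMod m (m - 2).toNat MODI else 1

-- row = [1] + [(a + b) % MOD for a, b in zip(row, row[1:])] + [1]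
def pascalStep (row : List Int) : List Int :=
  1 :: (row.zip (PySem.List.slice row (some 1) none)).map
        (fun ab => PySem.Int.mod (ab.1 + ab.2) MODI) ++ [1]

-- B's per-k term t (row[k] is always in range: 1 ≤ k ≤ n-1 and |row| = n+1)
def termB (n : Int) (row : List Int) (k : Int) : Int :=
  let t := PySem.Int.mod (PySem.Int.mod (PySem.List.pyGetD row k 0 * cayleyM k) MODI
            * cayleyM (n - k)) MODI
  PySem.Int.mod (PySem.Int.mod (t * k) MODI * (n - k)) MODI

def F_alt (n : Int) : Int :=
  let row := (PySem.List.pyRange 0 n 1).foldl (fun r _ => pascalStep r) [1]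
  let total := (PySem.List.pyRange 1 n 1).foldl
      (fun total k => PySem.Int.mod (total + min k (n - k) * termB n row k) MODI) 0
  let fact := (PySem.List.pyRange 2 n 1).foldl
      (fun f i => PySem.Int.mod (f * i) MODI) 1
  PySem.Int.mod (PySem.Int.mod (total * PySem.Int.floordiv (MODI + 1) 2) MODI * fact) MODI

-- ===== PRECONDITION & SPEC =====
-- Pre_F excludes exactly n ≤ 0, where Python A raises ValueError in factorial(n - 1).
def Pre_F (n : Int) : Prop := 1 ≤ n
instance (n : Int) : Decidable (Pre_F n) := by unfold Pre_F; infer_instance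
def pvWitness_F : Int := 6

def Spec_F (n : Int) (out : Int) : Prop := out = F_alt n
instance (n : Int) (out : Int) : Decidable (Spec_F n out) := by unfold Spec_F; infer_instance

-- ===== CLAIM (what is proved, stated in full; the proofs are below) =====
def Claim_equal_F : Prop := ∀ (n : Int), Dom_F n → Pre_F n → Spec_F n (F n)
-- ===== LEMMAS AND PROOFS =====

lemma modI_eq (a : Int) : PySem.Int.mod a MODI = a % MODI :=
  PySem.Int.mod_eq_emod_of_pos (by decide)

lemma castMod (a : Int) : ((PySem.Int.mod a MODI : Int) : ZMod 1000000007) = (a : ZMod 1000000007) := by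
  rw [modI_eq]
  have h : (MODI : Int) = ((1000000007 : ℕ) : Int) := by decide
  rw [h]
  exact ZMod.intCast_mod a 1000000007

lemma castEmod (a : Int) : ((a % MODI : Int) : ZMod 1000000007) = (a : ZMod 1000000007) := by
  rw [← modI_eq]; exact castMod a

lemma mod_eq_of_cast {X Y : Int} (h : (X : ZMod 1000000007) = (Y : ZMod 1000000007)) :
    PySem.Int.mod X MODI = PySem.Int.mod Y MODI := by
  rw [modI_eq, modI_eq]
  have hM : (MODI : Int) = ((1000000007 : ℕ) : Int) := by decide
  rw [hM]
  exact (ZMod.intCast_eq_intCast_iff X Y 1000000007).mp h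

-- both accumulation loops: a fold of (s + g k) % MOD is, mod MOD, the sum of the g k
lemma foldl_mod_sum (g : Int → Int) : ∀ (l : List Int) (S : Int),
    ((l.foldl (fun s k => PySem.Int.mod (s + g k) MODI) S : Int) : ZMod 1000000007)
      = (S : ZMod 1000000007) + (l.map (fun k => ((g k : Int) : ZMod 1000000007))).sum := by
  intro l
  induction l with
  | nil => simp
  | cons a t ih =>
    intro S
    simp only [List.foldl_cons, List.map_cons, List.sum_cons]
    rw [ih, castMod]
    push_cast
    ring

lemma sum_map_range (t : ℕ) (f : ℕ → ZMod 1000000007) :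
    ((List.range t).map f).sum = ∑ j ∈ Finset.range t, f j := by
  induction t with
  | zero => simp
  | succ m ih => rw [Finset.sum_range_succ, List.range_succ]; simp [ih]

-- the modular factorial loop computes factorial(n-1) mod MOD
lemma fact_fold : ∀ (m : ℕ) (n : Int), 1 ≤ n → (n - 1).toNat = m →
    (((PySem.List.pyRange 2 n 1).foldl (fun f i => PySem.Int.mod (f * i) MODI) 1 : Int) : ZMod 1000000007)
      = ((Nat.factorial (n - 1).toNat : ℕ) : ZMod 1000000007) := by
  intro m
  induction m with
  | zero =>
    intro n h1 hm
    have : n = 1 := by omega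
    subst this
    rw [PySem.List.pyRange_one_eq_nil (by omega)]
    simp
  | succ m ih =>
    intro n h1 hm
    by_cases h2 : n = 2
    · subst h2
      rw [PySem.List.pyRange_one_eq_nil (by omega)]
      decide
    have hsplit : PySem.List.pyRange 2 n 1 = PySem.List.pyRange 2 (n - 1) 1 ++ [n - 1] := by
      have := PySem.List.pyRange_one_succ_right (a := 2) (b := n - 1) (by omega)
      simpa using this
    rw [hsplit, List.foldl_append]
    simp only [List.foldl_cons, List.foldl_nil]
    rw [castMod]
    push_cast
    rw [ih (n - 1) (by omega) (by omega)]
    have h4 : (n - 1).toNat = (n - 1 - 1).toNat + 1 := by omega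
    rw [h4, Nat.factorial_succ]
    push_cast
    have hb : ((n - 1 - 1).toNat : ZMod 1000000007) = (((n - 1 - 1).toNat : Int) : ZMod 1000000007) := by
      push_cast; ring
    have hc : (((n - 1 - 1).toNat : Int) : ZMod 1000000007) = (n : ZMod 1000000007) - 2 := by
      rw [show ((n - 1 - 1).toNat : Int) = n - 2 by omega]; push_cast; ring
    rw [hb, hc]; ring

-- Pascal's recurrence, one step: applied to row m mod MOD it yields row m+1 mod MOD
lemma zpart (m : ℕ) (f : ℕ → Int) :
    (((List.range (m + 1)).map f).zip (((List.range (m + 1)).map f).tail)).map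
        (fun ab => PySem.Int.mod (ab.1 + ab.2) MODI)
      = (List.range m).map (fun j => PySem.Int.mod (f j + f (j + 1)) MODI) := by
  apply List.ext_getElem
  · simp [List.length_zip]
  intro i h1 h2
  rw [List.getElem_map, List.getElem_map, List.getElem_zip, List.getElem_tail,
    List.getElem_map, List.getElem_map, List.getElem_range]
  simp

lemma pascal_step_row (m : ℕ) :
    pascalStep ((List.range (m + 1)).map (fun j => ((Nat.choose m j : ℕ) : Int) % MODI))
      = (List.range (m + 2)).map (fun j => ((Nat.choose (m + 1) j : ℕ) : Int) % MODI) := by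
  unfold pascalStep
  rw [PySem.List.slice_from_one, zpart]
  have hr2 : List.range (m + 2) = 0 :: List.map Nat.succ (List.range (m + 1)) := List.range_succ_eq_map
  rw [hr2, List.map_cons, List.map_map]
  conv_rhs => rw [List.range_succ, List.map_append]
  have e0 : ((Nat.choose (m + 1) 0 : ℕ) : Int) % MODI = 1 := by
    rw [Nat.choose_zero_right]; decide
  have eend : (List.map ((fun j => ((Nat.choose (m + 1) j : ℕ) : Int) % MODI) ∘ Nat.succ) [m]) = [(1 : Int)] := by
    simp only [List.map_cons, List.map_nil, Function.comp_apply, Nat.succ_eq_add_one, Nat.choose_self]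
    norm_num
    decide
  have hmapeq : (List.range m).map (fun j => PySem.Int.mod
        (((Nat.choose m j : ℕ) : Int) % MODI + ((Nat.choose m (j + 1) : ℕ) : Int) % MODI) MODI)
      = (List.range m).map ((fun j => ((Nat.choose (m + 1) j : ℕ) : Int) % MODI) ∘ Nat.succ) := by
    apply List.map_congr_left
    intro j hj
    simp only [Function.comp_apply, Nat.succ_eq_add_one]
    rw [modI_eq, ← Int.add_emod, Nat.choose_succ_succ]
    push_cast
    rfl
  rw [e0, eend, hmapeq]
  simp

lemma pascal_iter : ∀ (m : ℕ),
    pascalStep^[m] [1] = (List.range (m + 1)).map (fun j => ((Nat.choose m j : ℕ) : Int) % MODI) := by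
  intro m
  induction m with
  | zero => simp; decide
  | succ m ih => rw [Function.iterate_succ_apply', ih, pascal_step_row]

lemma foldl_const_iterate (l : List Int) (r : List Int) :
    l.foldl (fun r _ => pascalStep r) r = pascalStep^[l.length] r := by
  induction l generalizing r with
  | nil => rfl
  | cons a t ih => simp [List.foldl_cons, ih, Function.iterate_succ_apply]

-- B's row read back: row[k] = C(n, k) % MOD
lemma row_get (n k : Int) (hn : 1 ≤ n) (hk : 0 ≤ k) (hk2 : k ≤ n) :
    PySem.List.pyGetD ((PySem.List.pyRange 0 n 1).foldl (fun r _ => pascalStep r) [1]) k 0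
      = ((Nat.choose n.toNat k.toNat : ℕ) : Int) % MODI := by
  rw [foldl_const_iterate, PySem.List.length_pyRange_one]
  have h0 : (n - 0).toNat = n.toNat := by omega
  rw [h0, pascal_iter]
  rw [PySem.List.pyGetD_eq_getElem _ _ hk (by simp; omega)]
  rw [List.getElem_map, List.getElem_range]

-- the common per-k residue both programs compute
def uTerm (n k : Int) : ZMod 1000000007 :=
  ((Nat.choose n.toNat k.toNat : ℕ) : ZMod 1000000007) * ((cayleyM k : Int) : ZMod 1000000007)
    * ((cayleyM (n - k) : Int) : ZMod 1000000007) * (k : ZMod 1000000007) * ((n - k : Int) : ZMod 1000000007)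

def inv2Z : ZMod 1000000007 := ((PySem.Int.floordiv (MODI + 1) 2 : Int) : ZMod 1000000007)

lemma inv2Z_two : inv2Z * 2 = 1 := by decide

lemma trees_eq (m : Int) (hm : 1 ≤ m) : pyPowMod m (m - 2) MODI = cayleyM m := by
  by_cases h : 1 < m
  · unfold pyPowMod cayleyM
    rw [if_neg (by omega), if_pos h]
  · have : m = 1 := by omega
    subst this
    decide

lemma castTermB (n k : Int) (hn : 1 ≤ n) (hk : 1 ≤ k) (hk2 : k < n) :
    ((termB n ((PySem.List.pyRange 0 n 1).foldl (fun r _ => pascalStep r) [1]) k : Int) : ZMod 1000000007)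
      = uTerm n k := by
  unfold termB
  rw [row_get n k hn (by omega) (by omega)]
  simp only [castMod, castEmod, Int.cast_mul]
  unfold uTerm
  push_cast
  ring

lemma castWaysA (n k : Int) (hk : 1 ≤ k) (hk2 : 2 * k ≤ n) :
    ((waysA n k : Int) : ZMod 1000000007)
      = uTerm n k * (if 2 * k = n then inv2Z else 1) := by
  unfold waysA
  have ht1 : (if k = 1 then (1 : Int) else pyPowMod k (k - 2) MODI) = cayleyM k := by
    by_cases h : k = 1
    · subst h; decide
    · rw [if_neg h, trees_eq k hk]
  have ht2 : pyPowMod (n - k) (n - k - 2) MODI = cayleyM (n - k) := trees_eq _ (by omega)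
  rw [ht1, ht2]
  by_cases hmid : 2 * k = n
  · rw [if_pos hmid, if_pos hmid]
    simp only [castMod, Int.cast_mul]
    unfold uTerm combI inv2Z
    push_cast
    ring
  · rw [if_neg hmid, if_neg hmid]
    simp only [castMod, Int.cast_mul]
    unfold uTerm combI
    push_cast
    ring

lemma uTerm_symm (n k : Int) (hk : 1 ≤ k) (hk2 : k < n) : uTerm n (n - k) = uTerm n k := by
  unfold uTerm
  rw [show n - (n - k) = k from by ring]
  rw [show (n - k).toNat = n.toNat - k.toNat from by omega]
  rw [Nat.choose_symm (by omega)]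
  ring

-- the pairing identity: summing min(k, n-k)·v(k) over the whole range and halving once equals
-- A's half-range sum with its halved middle term, for any v symmetric under k ↦ n-k
lemma pairing (n' : ℕ) (v : ℕ → ZMod 1000000007)
    (hsym : ∀ k, 1 ≤ k → k < n' → v (n' - k) = v k) :
    inv2Z * (∑ k ∈ Finset.Ico 1 n', ((min k (n' - k) : ℕ) : ZMod 1000000007) * v k)
      = ∑ k ∈ Finset.Ico 1 (n' / 2 + 1), (k : ZMod 1000000007) * v k * (if 2 * k = n' then inv2Z else 1) := by
  by_cases hn : n' ≤ 1
  · have h1 : Finset.Ico 1 n' = ∅ := by apply Finset.Ico_eq_empty; omega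
    have h2 : Finset.Ico 1 (n' / 2 + 1) = ∅ := by apply Finset.Ico_eq_empty; omega
    simp [h1, h2]
  push Not at hn
  set h := n' / 2 with hh
  have hsplit := Finset.sum_Ico_consecutive
    (f := fun k => ((min k (n' - k) : ℕ) : ZMod 1000000007) * v k)
    (m := 1) (n := h + 1) (k := n') (by omega) (by omega)
  rw [← hsplit]
  have hfirst : ∑ k ∈ Finset.Ico 1 (h + 1), ((min k (n' - k) : ℕ) : ZMod 1000000007) * v k
      = ∑ k ∈ Finset.Ico 1 (h + 1), (k : ZMod 1000000007) * v k := by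
    apply Finset.sum_congr rfl
    intro k hk
    simp only [Finset.mem_Ico] at hk
    rw [show min k (n' - k) = k from by omega]
  have hsecond : ∑ k ∈ Finset.Ico (h + 1) n', ((min k (n' - k) : ℕ) : ZMod 1000000007) * v k
      = ∑ j ∈ Finset.Ico 1 (n' - h), (j : ZMod 1000000007) * v j := by
    apply Finset.sum_nbij' (i := fun k => n' - k) (j := fun j => n' - j)
    · intro a ha; simp only [Finset.mem_Ico] at *; omega
    · intro a ha; simp only [Finset.mem_Ico] at *; omega
    · intro a ha; simp only [Finset.mem_Ico] at ha; omega
    · intro a ha; simp only [Finset.mem_Ico] at ha; omega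
    · intro a ha
      simp only [Finset.mem_Ico] at ha
      rw [show min a (n' - a) = n' - a from by omega]
      rw [hsym a (by omega) (by omega)]
  rw [hfirst, hsecond]
  rcases Nat.even_or_odd n' with he | ho
  · have hev : n' = 2 * h := by rcases he with ⟨t, ht⟩; omega
    have hnh : n' - h = h := by omega
    rw [hnh]
    have htop : ∑ k ∈ Finset.Ico 1 (h + 1), (k : ZMod 1000000007) * v k
        = (∑ k ∈ Finset.Ico 1 h, (k : ZMod 1000000007) * v k) + (h : ZMod 1000000007) * v h :=
      Finset.sum_Ico_succ_top (by omega) _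
    have hrhs : ∑ k ∈ Finset.Ico 1 (h + 1), (k : ZMod 1000000007) * v k * (if 2 * k = n' then inv2Z else 1)
        = (∑ k ∈ Finset.Ico 1 h, (k : ZMod 1000000007) * v k) + (h : ZMod 1000000007) * v h * inv2Z := by
      rw [Finset.sum_Ico_succ_top (by omega)]
      rw [if_pos (by omega)]
      congr 1
      apply Finset.sum_congr rfl
      intro k hk
      simp only [Finset.mem_Ico] at hk
      rw [if_neg (by omega), mul_one]
    rw [htop, hrhs]
    linear_combination (∑ k ∈ Finset.Ico 1 h, (k : ZMod 1000000007) * v k) * inv2Z_two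
  · have hod : n' = 2 * h + 1 := by rcases ho with ⟨t, ht⟩; omega
    have hnh : n' - h = h + 1 := by omega
    rw [hnh]
    have hrhs : ∑ k ∈ Finset.Ico 1 (h + 1), (k : ZMod 1000000007) * v k * (if 2 * k = n' then inv2Z else 1)
        = ∑ k ∈ Finset.Ico 1 (h + 1), (k : ZMod 1000000007) * v k := by
      apply Finset.sum_congr rfl
      intro k hk
      rw [if_neg (by omega), mul_one]
    rw [hrhs]
    linear_combination (∑ k ∈ Finset.Ico 1 (h + 1), (k : ZMod 1000000007) * v k) * inv2Z_two

-- A's loop, as a Finset sum over the half range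
lemma castA (n : Int) (hn : 1 ≤ n) :
    ((((PySem.List.pyRange 1 (PySem.Int.floordiv n 2 + 1) 1).foldl
        (fun S k => PySem.Int.mod (S + k * waysA n k) MODI) 0 : Int)) : ZMod 1000000007)
      = ∑ k ∈ Finset.Ico 1 (n.toNat / 2 + 1),
          (k : ZMod 1000000007) * uTerm n (k : ℕ) * (if 2 * k = n.toNat then inv2Z else 1) := by
  rw [foldl_mod_sum (fun k => k * waysA n k)]
  have hfd : PySem.Int.floordiv n 2 = ((n.toNat / 2 : ℕ) : Int) := by
    rw [PySem.Int.floordiv_eq_ediv_of_pos (by omega)]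
    omega
  rw [hfd, PySem.List.pyRange_one, List.map_map]
  have hlen : ((((n.toNat / 2 : ℕ) : Int) + 1) - 1).toNat = n.toNat / 2 := by omega
  rw [hlen, sum_map_range]
  rw [Finset.sum_Ico_eq_sum_range]
  simp only [Nat.add_sub_cancel, Int.cast_zero, zero_add, Function.comp_apply]
  apply Finset.sum_congr rfl
  intro j hj
  simp only [Finset.mem_range] at hj
  push_cast
  rw [castWaysA n (1 + (j : Int)) (by omega) (by omega)]
  have hcond : (2 * (1 + (j : Int)) = n) ↔ (2 * (1 + j) = n.toNat) := by omega
  rw [if_congr hcond rfl rfl]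
  ring

-- B's loop, as a Finset sum over the full range
lemma castB (n : Int) (hn : 1 ≤ n) :
    ((((PySem.List.pyRange 1 n 1).foldl
        (fun total k => PySem.Int.mod (total + min k (n - k)
          * termB n ((PySem.List.pyRange 0 n 1).foldl (fun r _ => pascalStep r) [1]) k) MODI) 0 : Int)) : ZMod 1000000007)
      = ∑ k ∈ Finset.Ico 1 n.toNat,
          ((min k (n.toNat - k) : ℕ) : ZMod 1000000007) * uTerm n (k : ℕ) := by
  rw [foldl_mod_sum (fun k => min k (n - k)
    * termB n ((PySem.List.pyRange 0 n 1).foldl (fun r _ => pascalStep r) [1]) k)]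
  rw [PySem.List.pyRange_one 1 n, List.map_map]
  rw [sum_map_range]
  rw [Finset.sum_Ico_eq_sum_range]
  simp only [Int.cast_zero, zero_add, Function.comp_apply]
  have hln : (n - 1).toNat = n.toNat - 1 := by omega
  rw [hln]
  apply Finset.sum_congr rfl
  intro j hj
  simp only [Finset.mem_range] at hj
  push_cast
  rw [castTermB n (1 + (j : Int)) hn (by omega) (by omega)]
  have hmin : ((min (1 + (j : Int)) (n - (1 + (j : Int))) : Int) : ZMod 1000000007)
      = ((min (1 + j) (n.toNat - (1 + j)) : ℕ) : ZMod 1000000007) := by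
    have h1 : (min (1 + (j : Int)) (n - (1 + (j : Int))) : Int)
        = ((min (1 + j) (n.toNat - (1 + j)) : ℕ) : Int) := by omega
    rw [h1, Int.cast_natCast]
  rw [hmin]

-- ===== VERDICT (by name: the statement is the Claim_ definition above) =====
theorem F_spec : Claim_equal_F := by
  intro n _ hn
  unfold Pre_F at hn
  unfold Spec_F F F_alt
  apply mod_eq_of_cast
  simp only [Int.cast_mul, castMod]
  rw [castA n hn, castB n hn, fact_fold (n - 1).toNat n hn rfl]
  have hsym : ∀ k, 1 ≤ k → k < n.toNat →
      uTerm n ((n.toNat - k : ℕ) : Int) = uTerm n (k : ℕ) := by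
    intro k h1 h2
    rw [show ((n.toNat - k : ℕ) : Int) = n - (k : ℕ) from by omega]
    exact uTerm_symm n k (by exact_mod_cast h1) (by omega)
  have hp := pairing n.toNat (fun k => uTerm n (k : ℕ)) hsym
  push_cast
  rw [← hp]
  unfold inv2Z
  push_cast
  ring
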